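-- pv_equiv track=rewrite | github.com/achaljhawar/agent-runner | src/agentrunner/tools/search.py | _format_count_output
-- ===== SOURCE A (Python) =====
-- MAX_CHARS = 10_000
--
-- MAX_CHARS_PER_LINE = 1_000
--
-- def _first_idx_exceed_cum_limit(lines: list[str], limit: int) -> int:
--     """Find first index where cumulative length exceeds limit.
--
--     Args:
--         lines: Lines to check
--         limit: Character limit
--
--     Returns:
--         First index exceeding limit, or len(lines) if none
--     """
--     cum_len = 0
--     for i, line in enumerate(lines):
--         cum_len += len(line)
--         if cum_len > limit:
--             return i
--     return len(lines)
--
-- def _trim_line(line: str) -> str: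
--     """Trim line to max length.
--
--     Args:
--         line: Line to trim
--
--     Returns:
--         Trimmed line with indicator if truncated
--     """
--     if len(line) > MAX_CHARS_PER_LINE:
--         return line[:MAX_CHARS_PER_LINE] + " [... omitted end of long line]"
--     return line
--
-- def _format_count_output(lines: list[str], is_truncated: bool) -> str:
--     """Format count output mode.
--
--     Args:
--         lines: Output lines
--         is_truncated: Whether output was truncated
--
--     Returns:
--         Formatted string
--     """
--     is_truncated_str = "at least " if is_truncated else ""
--     sum_matches = 0
--
--     for line in lines:
--         try:
--             count_str = line.split(":")[-1]
--             sum_matches += int(count_str)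
--         except (ValueError, IndexError):
--             pass
--
--     trimmed_lines = [_trim_line(line) for line in lines]
--     cut_idx = _first_idx_exceed_cum_limit(trimmed_lines, MAX_CHARS)
--
--     result_lines = [f"Found {sum_matches} across {is_truncated_str}{len(lines)} files"]
--     result_lines.extend(trimmed_lines[:cut_idx])
--
--     if len(trimmed_lines) > cut_idx:
--         result_lines.append(
--             f"... [{is_truncated_str}{len(trimmed_lines) - cut_idx} lines truncated] ..."
--         )
--
--     return "\n".join(result_lines)
-- ===== SOURCE B (Python) =====
-- MAX_CHARS = 10_000
--
-- MAX_CHARS_PER_LINE = 1_000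
--
--
-- def _format_count_output(lines, is_truncated):
--     prefix = "at least " if is_truncated else ""
--     total = 0
--     for line in lines:
--         try:
--             total += int(line.split(":")[-1])
--         except (ValueError, IndexError):
--             pass
--
--     trimmed = [
--         line[:MAX_CHARS_PER_LINE] + " [... omitted end of long line]"
--         if len(line) > MAX_CHARS_PER_LINE
--         else line
--         for line in lines
--     ]
--
--     # prefix sums of trimmed lengths, then BINARY SEARCH (prefix sums are
--     # nondecreasing since lengths are nonnegative) for the number of leading
--     # lines whose cumulative length stays within MAX_CHARS
--     cums = []
--     s = 0
--     for t in trimmed: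
--         s += len(t)
--         cums.append(s)
--     lo, hi = 0, len(cums)
--     while lo < hi:
--         mid = (lo + hi) // 2
--         if cums[mid] <= MAX_CHARS:
--             lo = mid + 1
--         else:
--             hi = mid
--     cut = lo
--
--     result = [f"Found {total} across {prefix}{len(lines)} files"] + trimmed[:cut]
--     if cut < len(lines):
--         result.append(f"... [{prefix}{len(lines) - cut} lines truncated] ...")
--     return "\n".join(result)
-- ===== Notes on version B (the rewrite author's own statement) =====
-- stated objective: alternative
-- what changed: Replaced A's linear enumerate scan for the cumulative cutoff index with prefix sums of the trimmed lengths followed by a hand-written binary search (correct because prefix sums of nonnegative lengths are nondecreasing), keeping the count-summing loop and trim comprehension.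
import Mathlib
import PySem

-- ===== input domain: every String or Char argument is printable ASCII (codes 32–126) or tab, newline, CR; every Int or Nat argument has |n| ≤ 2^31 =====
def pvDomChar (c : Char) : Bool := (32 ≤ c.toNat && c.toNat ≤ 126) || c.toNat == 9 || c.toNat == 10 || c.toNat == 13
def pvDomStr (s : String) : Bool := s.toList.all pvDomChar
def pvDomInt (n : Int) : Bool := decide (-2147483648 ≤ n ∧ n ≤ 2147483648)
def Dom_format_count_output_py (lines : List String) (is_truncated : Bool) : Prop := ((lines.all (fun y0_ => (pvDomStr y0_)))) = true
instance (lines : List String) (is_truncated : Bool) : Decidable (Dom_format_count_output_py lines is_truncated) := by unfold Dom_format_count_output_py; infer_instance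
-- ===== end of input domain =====

-- B replaces A's linear cumulative-cutoff scan by prefix sums of the trimmed lengths plus a
-- hand-written binary search for the cutoff index (objective: alternative algorithm, same cost).

-- ===== PORT A =====
-- module helper _trim_line (shared by both Pythons)
def pv_trim_line (line : String) : String :=
  if PySem.Str.len line > 1000 then
    PySem.Str.slice line none (some 1000) ++ " [... omitted end of long line]"
  else line

-- module helper _first_idx_exceed_cum_limit (the early return becomes structural recursion)
def pv_first_go (ls : List String) (limit : Int) (cum : Int) (i : Int) (n : Int) : Int :=
  match ls with
  | [] => n
  | l :: rest =>
      let cum' := cum + PySem.Str.len l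
      if cum' > limit then i else pv_first_go rest limit cum' (i + 1) n

def pv_first_idx_exceed_cum_limit (lines : List String) (limit : Int) : Int :=
  pv_first_go lines limit 0 0 (PySem.List.len lines)

def format_count_output_py (lines : List String) (is_truncated : Bool) : String :=
  let is_truncated_str := if is_truncated then "at least " else ""
  let sum_matches : Int := lines.foldl (fun acc line =>
      match PySem.Str.split? line ":" with
      | none => acc
      | some parts =>
        match PySem.List.pyGet? parts (-1) with
        | none => acc
        | some cs =>
          match PySem.Int.ofStr? cs with
          | none => acc
          | some k => acc + k) 0
  let trimmed_lines := lines.map pv_trim_line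
  let cut_idx := pv_first_idx_exceed_cum_limit trimmed_lines 10000
  let result_lines := ("Found " ++ PySem.Int.toStr sum_matches ++ " across " ++ is_truncated_str
        ++ PySem.Int.toStr (PySem.List.len lines) ++ " files")
      :: PySem.List.slice trimmed_lines none (some cut_idx)
  let result_lines := if PySem.List.len trimmed_lines > cut_idx then
      result_lines ++ ["... [" ++ is_truncated_str
        ++ PySem.Int.toStr (PySem.List.len trimmed_lines - cut_idx) ++ " lines truncated] ..."]
    else result_lines
  PySem.Str.join "\n" result_lines

-- ===== PORT B =====
-- the prefix-sum list of the trimmed lengths (Source B's accumulation loop)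
def pv_cums (ls : List String) (s : Int) : List Int :=
  match ls with
  | [] => []
  | t :: rest =>
      let s' := s + PySem.Str.len t
      s' :: pv_cums rest s'

-- Source B's while-loop binary search; cums[mid] is ported with getD 0, exact here because
-- lo < hi ≤ cums.length at every call so mid is always in range
def pv_bsearch (cums : List Int) (lo hi : Nat) : Nat :=
  if _h : lo < hi then
    let mid := (lo + hi) / 2
    if cums.getD mid 0 ≤ 10000 then pv_bsearch cums (mid + 1) hi
    else pv_bsearch cums lo mid
  else lo
termination_by hi - lo
decreasing_by all_goals omega

def format_count_output_py_alt (lines : List String) (is_truncated : Bool) : String :=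
  let pfx := if is_truncated then "at least " else ""
  let total : Int := lines.foldl (fun acc line =>
      match PySem.Str.split? line ":" with
      | none => acc
      | some parts =>
        match PySem.List.pyGet? parts (-1) with
        | none => acc
        | some cs =>
          match PySem.Int.ofStr? cs with
          | none => acc
          | some k => acc + k) 0
  let trimmed := lines.map pv_trim_line
  let cums := pv_cums trimmed 0
  let cut := pv_bsearch cums 0 cums.length
  let result := ("Found " ++ PySem.Int.toStr total ++ " across " ++ pfx
        ++ PySem.Int.toStr (PySem.List.len lines) ++ " files")
      :: PySem.List.slice trimmed none (some (cut : Int))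
  let result := if cut < lines.length then
      result ++ ["... [" ++ pfx
        ++ PySem.Int.toStr (PySem.List.len lines - (cut : Int)) ++ " lines truncated] ..."]
    else result
  PySem.Str.join "\n" result

-- ===== PRECONDITION & SPEC =====
def Spec_format_count_output_py (lines : List String) (is_truncated : Bool) (out : String) : Prop := out = format_count_output_py_alt lines is_truncated
instance (lines : List String) (is_truncated : Bool) (out : String) : Decidable (Spec_format_count_output_py lines is_truncated out) := by unfold Spec_format_count_output_py; infer_instance

-- ===== CLAIM =====
def Claim_equal_format_count_output_py : Prop := ∀ (lines : List String) (is_truncated : Bool), Dom_format_count_output_py lines is_truncated → Spec_format_count_output_py lines is_truncated (format_count_output_py lines is_truncated)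

-- ===== LEMMAS AND PROOFS =====

-- the first index at which the cumulative trimmed length exceeds the limit (as a count)
def pvCnt (ts : List String) (cum : Int) : Nat :=
  match ts with
  | [] => 0
  | t :: rest => if cum + PySem.Str.len t > 10000 then 0 else 1 + pvCnt rest (cum + PySem.Str.len t)

theorem pvCnt_le_length (ts : List String) (cum : Int) : pvCnt ts cum ≤ ts.length := by
  induction ts generalizing cum with
  | nil => simp [pvCnt]
  | cons t rest ih =>
      simp only [pvCnt, List.length_cons]
      split
      · omega
      · have := ih (cum + PySem.Str.len t); omega

theorem pv_first_go_eq (ts : List String) :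
    ∀ (cum i n : Int), pv_first_go ts 10000 cum i n =
      if pvCnt ts cum = ts.length then n else i + pvCnt ts cum := by
  induction ts with
  | nil => intro cum i n; simp [pv_first_go, pvCnt]
  | cons t rest ih =>
      intro cum i n
      simp only [pv_first_go, pvCnt, List.length_cons]
      split
      · simp
      · rw [ih]
        split_ifs <;> push_cast <;> omega

theorem pv_cums_length (ts : List String) (s : Int) : (pv_cums ts s).length = ts.length := by
  induction ts generalizing s with
  | nil => simp [pv_cums]
  | cons t rest ih => simp [pv_cums, ih]

theorem pv_cums_ge (ts : List String) (s : Int) (k : Nat) (hk : k < ts.length) :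
    s ≤ (pv_cums ts s).getD k 0 := by
  induction ts generalizing s k with
  | nil => simp at hk
  | cons t rest ih =>
      cases k with
      | zero =>
          simp only [pv_cums, List.getD_cons_zero]
          simp only [PySem.Str.len_eq, String.length_toList]
          omega
      | succ k =>
          simp only [pv_cums, List.getD_cons_succ]
          have h1 := ih (s + PySem.Str.len t) k (by simp only [List.length_cons] at hk; omega)
          have h2 : (0:Int) ≤ PySem.Str.len t := by
            simp only [PySem.Str.len_eq, String.length_toList]; omega
          omega

theorem pv_cums_lt_cnt (ts : List String) (s : Int) (k : Nat) (hk : k < pvCnt ts s) :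
    (pv_cums ts s).getD k 0 ≤ 10000 := by
  induction ts generalizing s k with
  | nil => simp [pvCnt] at hk
  | cons t rest ih =>
      simp only [pvCnt] at hk
      simp only [PySem.Str.len_eq, String.length_toList] at hk
      by_cases h : (10000:Int) < s + (t.length : Int)
      · rw [if_pos h] at hk; omega
      · rw [if_neg h] at hk
        cases k with
        | zero =>
            simp only [pv_cums, List.getD_cons_zero]
            simp only [PySem.Str.len_eq, String.length_toList]
            omega
        | succ k =>
            simp only [pv_cums, List.getD_cons_succ]
            have := ih (s + PySem.Str.len t) k (by
              simp only [PySem.Str.len_eq, String.length_toList]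
              omega)
            exact this

theorem pv_cums_ge_cnt (ts : List String) (s : Int) (hc : pvCnt ts s < ts.length)
    (k : Nat) (hk1 : pvCnt ts s ≤ k) (hk2 : k < ts.length) :
    10000 < (pv_cums ts s).getD k 0 := by
  induction ts generalizing s k with
  | nil => simp at hk2
  | cons t rest ih =>
      simp only [pvCnt, List.length_cons] at hc hk1
      simp only [PySem.Str.len_eq, String.length_toList] at hc hk1
      by_cases h : (10000:Int) < s + (t.length : Int)
      · -- first element already exceeds; every later entry is ≥ s + len t > 10000
        cases k with
        | zero =>
            simp only [pv_cums, List.getD_cons_zero]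
            simp only [PySem.Str.len_eq, String.length_toList]
            omega
        | succ k =>
            simp only [pv_cums, List.getD_cons_succ]
            have h1 := pv_cums_ge rest (s + PySem.Str.len t) k
              (by simp only [List.length_cons] at hk2; omega)
            have h2 : PySem.Str.len t = (t.length : Int) := by
              simp only [PySem.Str.len_eq, String.length_toList]
            omega
      · rw [if_neg h] at hc hk1
        cases k with
        | zero => omega
        | succ k =>
            simp only [pv_cums, List.getD_cons_succ]
            have h2 : PySem.Str.len t = (t.length : Int) := by
              simp only [PySem.Str.len_eq, String.length_toList]
            rw [h2]
            exact ih (s + (t.length : Int)) (by omega) k (by omega)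
              (by simp only [List.length_cons] at hk2; omega)

-- binary-search correctness on the prefix-sum list: the invariant lo ≤ c ≤ hi is preserved
theorem pv_bsearch_eq (ts : List String) (lo hi : Nat)
    (hlo : lo ≤ pvCnt ts 0) (hhi : pvCnt ts 0 ≤ hi) (hn : hi ≤ ts.length) :
    pv_bsearch (pv_cums ts 0) lo hi = pvCnt ts 0 := by
  set c := pvCnt ts 0 with hc
  by_cases h : lo < hi
  · rw [pv_bsearch, dif_pos h]
    set mid := (lo + hi) / 2 with hmid
    have hmlt : mid < hi := by omega
    by_cases hle : (pv_cums ts 0).getD mid 0 ≤ 10000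
    · rw [if_pos hle]
      have hmc : mid < c := by
        by_contra hcon
        push Not at hcon
        by_cases hfull : c = ts.length
        · omega
        · have := pv_cums_ge_cnt ts 0 (by omega) mid hcon (by omega)
          omega
      exact pv_bsearch_eq ts (mid + 1) hi (by omega) hhi hn
    · rw [if_neg hle]
      have hcm : c ≤ mid := by
        by_contra hcon
        push Not at hcon
        exact hle (pv_cums_lt_cnt ts 0 mid hcon)
      exact pv_bsearch_eq ts lo mid hlo hcm (by omega)
  · rw [pv_bsearch, dif_neg h]; omega
termination_by hi - lo
decreasing_by all_goals omega

theorem format_count_output_py_eq (lines : List String) (is_truncated : Bool) :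
    format_count_output_py lines is_truncated = format_count_output_py_alt lines is_truncated := by
  simp only [format_count_output_py, format_count_output_py_alt, pv_first_idx_exceed_cum_limit]
  rw [pv_first_go_eq]
  set ts := lines.map pv_trim_line with hts
  have hlen : ts.length = lines.length := by simp [hts]
  set c := pvCnt ts 0 with hc
  have hcle : c ≤ ts.length := pvCnt_le_length ts 0
  rw [pv_bsearch_eq ts 0 (pv_cums ts 0).length (by omega)
        (by rw [pv_cums_length]; exact hcle) (by rw [pv_cums_length])]
  have hslice : PySem.List.slice ts none (some ((c : Nat) : Int)) = ts.take c :=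
    PySem.List.slice_to_natCast ts c
  by_cases hfull : c = ts.length
  · rw [if_pos hfull]
    have h1 : PySem.List.slice ts none (some (PySem.List.len ts)) = ts.take c := by
      rw [show PySem.List.len ts = ((ts.length : Nat) : Int) from by simp [PySem.List.len_eq],
          PySem.List.slice_to_natCast]
      simp [hfull]
    rw [h1, hslice]
    rw [if_neg (by simp), if_neg (show ¬ c < lines.length by omega)]
  · rw [if_neg hfull]
    have hlt : c < ts.length := lt_of_le_of_ne hcle hfull
    have h1 : PySem.List.slice ts none (some ((0 : Int) + (c : Int))) = ts.take c := by
      rw [show ((0 : Int) + (c : Int)) = ((c : Nat) : Int) from by ring,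
          PySem.List.slice_to_natCast]
    rw [h1, hslice]
    have hA : PySem.List.len ts > 0 + (c : Int) := by
      simp only [PySem.List.len_eq]; omega
    rw [if_pos hA, if_pos (show c < lines.length by omega)]
    have hN : PySem.List.len ts - (0 + (c : Int)) = PySem.List.len lines - (c : Int) := by
      simp only [PySem.List.len_eq]; omega
    rw [hN]

-- ===== VERDICT =====
theorem format_count_output_py_spec : Claim_equal_format_count_output_py := by
  intro lines is_truncated _
  unfold Spec_format_count_output_py
  exact format_count_output_py_eq lines is_truncated
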